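-- pv_equiv track=rewrite | github.com/Sassa-nf/pi | scoreboard/a.py | getMinProblemCount1
-- ===== SOURCE A (Python) =====
-- def getMinProblemCount1(n, S):
--    def f(cs, s):
--       if not cs:
--          return max(s)
--       choice1 = f(cs[1:], s)
--       choice2 = choice1
--       for v in s:
--          if v >= cs[0]:
--             choice2 = 1 + f(cs, [v - cs[0] if v >= cs[0] else v for v in s])
--             break
--       return min(choice1, choice2)
--    return f([3, 2, 1], S)
-- ===== SOURCE B (Python) =====
-- def getMinProblemCount1(n, S):
--     # Polynomial search over the number of 3-point and 2-point problems used
--     # (each "use" subtracts its value from every score still large enough,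
--     # capped at v // m uses per score); remaining 1-point problems = max residual.
--     def resid(k, m, vs):
--         return [v - m * min(k, max(v // m, 0)) for v in vs]
--     def best2(t):
--         return min(k2 + max(resid(k2, 2, t))
--                    for k2 in range(max(0, max(v // 2 for v in t)) + 1))
--     return min(k3 + best2(resid(k3, 3, S))
--                for k3 in range(max(0, max(v // 3 for v in S)) + 1))
-- ===== Notes on version B (the rewrite author's own statement) =====
-- stated objective: faster
-- what changed: A's exponential branching recursion over [3,2,1] is replaced by a direct polynomial search: for each candidate count of 3-point and 2-point problems (bounded by the floor-divided maxima) B computes the residual scores in closed form and takes the max residual as the count of 1-point problems, minimising over the two counts.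
import Mathlib
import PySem

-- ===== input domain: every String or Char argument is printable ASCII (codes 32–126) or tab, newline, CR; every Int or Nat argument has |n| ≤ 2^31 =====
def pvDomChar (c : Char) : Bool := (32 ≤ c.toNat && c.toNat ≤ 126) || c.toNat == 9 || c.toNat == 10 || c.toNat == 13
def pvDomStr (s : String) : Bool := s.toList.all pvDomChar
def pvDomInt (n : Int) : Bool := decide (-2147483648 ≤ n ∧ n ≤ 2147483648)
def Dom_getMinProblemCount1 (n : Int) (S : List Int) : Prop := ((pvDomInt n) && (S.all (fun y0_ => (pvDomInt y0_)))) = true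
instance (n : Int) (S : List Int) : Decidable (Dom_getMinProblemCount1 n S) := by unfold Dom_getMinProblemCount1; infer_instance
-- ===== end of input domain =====

-- B replaces A's exponential branching recursion by a polynomial direct search over
-- the number of 3-point and 2-point problems (objective: faster).

-- ===== PORT A =====
-- termination measure helpers for A's recursion (cited by the port's decreasing_by)
def pvSumNat (s : List Int) : Nat := (s.map Int.toNat).sum

theorem pvSumNat_map_le (c : Int) (hc : 1 ≤ c) :
    ∀ t : List Int, pvSumNat (t.map (fun v => if c ≤ v then v - c else v)) ≤ pvSumNat t := by
  intro t
  induction t with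
  | nil => simp [pvSumNat]
  | cons y u ih =>
      simp only [pvSumNat, List.map_cons, List.sum_cons] at ih ⊢
      have h : ((if c ≤ y then y - c else y).toNat) ≤ y.toNat := by
        split_ifs with h0 <;> omega
      omega

theorem pvSumNat_dec (c : Int) (hc : 1 ≤ c) :
    ∀ s : List Int, (∃ v ∈ s, c ≤ v) →
      pvSumNat (s.map (fun v => if c ≤ v then v - c else v)) < pvSumNat s := by
  intro s
  induction s with
  | nil => rintro ⟨v, hv, -⟩; cases hv
  | cons x t ih =>
      rintro ⟨v, hv, hcv⟩
      have hle := pvSumNat_map_le c hc t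
      simp only [pvSumNat, List.map_cons, List.sum_cons] at hle ⊢
      rcases List.mem_cons.mp hv with h | h
      · subst h
        have hx : (if c ≤ v then v - c else v) = v - c := by simp [hcv]
        rw [hx]
        have : (v - c).toNat < v.toNat := by omega
        omega
      · have hlt := ih ⟨v, h, hcv⟩
        simp only [pvSumNat] at hlt
        have : ((if c ≤ x then x - c else x).toNat) ≤ x.toNat := by
          split_ifs with h2 <;> omega
        omega

-- literal port of A's inner f; Python's max([]) raises (excluded by Pre_), ported as .getD 0.
-- The loop "for v in s: if v >= cs[0]: …; break" fires iff some v ≥ cs[0]; the extra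
-- conjunct 1 ≤ cs[0] only makes the recursion total (Python diverges there; unreachable
-- from cs = [3,2,1]).
def pvF : List Int → List Int → Int
  | [], s => (PySem.List.max? s (fun y => y)).getD 0
  | c :: rest, s =>
    let choice1 := pvF rest s
    let choice2 :=
      if 1 ≤ c ∧ ∃ v ∈ s, c ≤ v then
        1 + pvF (c :: rest) (s.map (fun v => if c ≤ v then v - c else v))
      else choice1
    min choice1 choice2
termination_by cs s => (cs.length, pvSumNat s)
decreasing_by
  · exact Prod.Lex.left _ _ (by simp)
  · exact Prod.Lex.right _ (by rename_i h; simpa using pvSumNat_dec c h.1 s h.2)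

def getMinProblemCount1 (n : Int) (S : List Int) : Int := pvF [3, 2, 1] S

-- ===== PORT B =====
-- max(xs) over a nonempty list (Python max; only applied to nonempty lists under Pre_)
def pvMax (t : List Int) : Int := (PySem.List.max? t (fun y => y)).getD 0

def pvResid (k m : Int) (vs : List Int) : List Int :=
  vs.map (fun v => v - m * min k (max (PySem.Int.floordiv v m) 0))

def pvBest2 (t : List Int) : Int :=
  let K2 := max 0 (pvMax (t.map (fun v => PySem.Int.floordiv v 2)))
  (PySem.List.min? ((PySem.List.pyRange 0 (K2 + 1) 1).map
      (fun k2 => k2 + pvMax (pvResid k2 2 t))) (fun y => y)).getD 0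

def getMinProblemCount1_alt (n : Int) (S : List Int) : Int :=
  let K3 := max 0 (pvMax (S.map (fun v => PySem.Int.floordiv v 3)))
  (PySem.List.min? ((PySem.List.pyRange 0 (K3 + 1) 1).map
      (fun k3 => k3 + pvBest2 (pvResid k3 3 S))) (fun y => y)).getD 0

-- ===== PRECONDITION & SPEC =====
-- Pre_ excludes only the empty score list, on which Python A raises ValueError (max of
-- an empty sequence); B raises there too.
def Pre_getMinProblemCount1 (n : Int) (S : List Int) : Prop := S ≠ []
instance (n : Int) (S : List Int) : Decidable (Pre_getMinProblemCount1 n S) := by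
  unfold Pre_getMinProblemCount1; infer_instance

def pvWitness_getMinProblemCount1 : Int × List Int := (3, [7, 4, 1])

def Spec_getMinProblemCount1 (n : Int) (S : List Int) (out : Int) : Prop := out = getMinProblemCount1_alt n S
instance (n : Int) (S : List Int) (out : Int) : Decidable (Spec_getMinProblemCount1 n S out) := by unfold Spec_getMinProblemCount1; infer_instance

-- ===== CLAIM (what is proved, stated in full; the proofs are below) =====
def Claim_equal_getMinProblemCount1 : Prop := ∀ (n : Int) (S : List Int), Dom_getMinProblemCount1 n S → Pre_getMinProblemCount1 n S → Spec_getMinProblemCount1 n S (getMinProblemCount1 n S)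

-- ===== LEMMAS AND PROOFS =====

-- max over a nonempty list: characterisation and membership
theorem pvMax_eq_of (s : List Int) (m : Int) (hm : m ∈ s) (hub : ∀ v ∈ s, v ≤ m) :
    pvMax s = m := by
  cases hx : PySem.List.max? s (fun y => y) with
  | none => exact absurd ((PySem.List.max?_eq_none_iff s _).mp hx ▸ hm) (List.not_mem_nil)
  | some m' =>
      have h1 : m' ∈ s := PySem.List.max?_mem hx
      have h2 : m ≤ m' := PySem.List.max?_isMax hx m hm
      have h3 : m' ≤ m := hub m' h1
      simp [pvMax, hx]; omega

theorem pvMax_mem (s : List Int) (hne : s ≠ []) : pvMax s ∈ s := by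
  cases hx : PySem.List.max? s (fun y => y) with
  | none => exact absurd ((PySem.List.max?_eq_none_iff s _).mp hx) hne
  | some m' => simpa [pvMax, hx] using PySem.List.max?_mem hx

theorem le_pvMax (s : List Int) (v : Int) (hv : v ∈ s) : v ≤ pvMax s := by
  cases hx : PySem.List.max? s (fun y => y) with
  | none => exact absurd ((PySem.List.max?_eq_none_iff s _).mp hx ▸ hv) (List.not_mem_nil)
  | some m' => simpa [pvMax, hx] using PySem.List.max?_isMax hx v hv

-- floor-division facts (0 < c)
theorem pvFdiv_nonpos (c v : Int) (hc : 0 < c) (h : v < c) : PySem.Int.floordiv v c ≤ 0 := by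
  have := (PySem.Int.floordiv_lt_iff_lt_mul (a := v) (b := c) (q := 1) hc).mpr (by omega)
  omega

theorem pvFdiv_pos (c v : Int) (hc : 0 < c) (h : c ≤ v) : 1 ≤ PySem.Int.floordiv v c := by
  exact (PySem.Int.le_floordiv_iff_mul_le hc).mpr (by omega)

theorem pvFdiv_sub (c v : Int) (hc : 0 < c) :
    PySem.Int.floordiv (v - c) c = PySem.Int.floordiv v c - 1 := by
  have h1 : PySem.Int.floordiv v c * c ≤ v :=
    (PySem.Int.le_floordiv_iff_mul_le hc).mp le_rfl
  have h2 : v < (PySem.Int.floordiv v c + 1) * c :=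
    (PySem.Int.floordiv_lt_iff_lt_mul hc).mp (lt_add_one _)
  refine (PySem.Int.floordiv_eq_iff_of_pos hc).mpr ⟨?_, ?_⟩ <;> nlinarith

-- resid facts
theorem pvResid_zero (c : Int) (s : List Int) : pvResid 0 c s = s := by
  unfold pvResid
  have : ∀ v ∈ s, v - c * min 0 (max (PySem.Int.floordiv v c) 0) = id v := by
    intro v _
    have h0 : min (0:Int) (max (PySem.Int.floordiv v c) 0) = 0 := by omega
    rw [h0]
    simp
  rw [List.map_congr_left this, List.map_id]

theorem pvResid_shift (c k : Int) (s : List Int) (hc : 0 < c) (hk : 0 ≤ k) :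
    pvResid k c (s.map (fun v => if c ≤ v then v - c else v)) = pvResid (k + 1) c s := by
  unfold pvResid
  rw [List.map_map]
  apply List.map_congr_left
  intro v _
  simp only [Function.comp]
  by_cases hv : c ≤ v
  · have hq := pvFdiv_pos c v hc hv
    rw [if_pos hv, pvFdiv_sub c v hc]
    have hmax1 : max (PySem.Int.floordiv v c - 1) 0 = PySem.Int.floordiv v c - 1 := by omega
    have hmax2 : max (PySem.Int.floordiv v c) 0 = PySem.Int.floordiv v c := by omega
    rw [hmax1, hmax2]
    rcases le_total k (PySem.Int.floordiv v c - 1) with h | h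
    · rw [min_eq_left h, min_eq_left (by omega)]; ring
    · rw [min_eq_right h, min_eq_right (by omega)]; ring
  · have hq := pvFdiv_nonpos c v hc (by omega)
    rw [if_neg hv]
    have hmax : max (PySem.Int.floordiv v c) 0 = 0 := by omega
    rw [hmax]
    have h1 : min k (0:Int) = 0 := by omega
    have h2 : min (k+1) (0:Int) = 0 := by omega
    rw [h1, h2]

-- foldl-min bookkeeping
theorem pvMinL_pull : ∀ (t : List Int) (x y : Int),
    t.foldl min (min x y) = min x (t.foldl min y) := by
  intro t
  induction t with
  | nil => intro x y; rfl
  | cons z u ih =>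
      intro x y
      simp only [List.foldl_cons]
      rw [min_assoc, ih]

theorem pvMinL_shift : ∀ (t : List Int) (y : Int),
    (t.map (fun a => 1 + a)).foldl min (1 + y) = 1 + t.foldl min y := by
  intro t
  induction t with
  | nil => intro y; rfl
  | cons z u ih =>
      intro y
      simp only [List.map_cons, List.foldl_cons]
      have : min (1 + y) (1 + z) = 1 + min y z := by omega
      rw [this, ih]

theorem pvMinFold_shift (l : List Int) (x : Int) (hne : l ≠ []) :
    (l.map (fun a => 1 + a)).foldl min x
      = min x (1 + ((PySem.List.min? l (fun y => y)).getD 0)) := by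
  cases l with
  | nil => exact absurd rfl hne
  | cons y t =>
      simp only [List.map_cons, List.foldl_cons, PySem.List.min?_id_cons, Option.getD_some]
      rw [show min x (1 + y) = min x (1 + y) from rfl]
      calc (t.map (fun a => 1 + a)).foldl min (min x (1 + y))
          = min x ((t.map (fun a => 1 + a)).foldl min (1 + y)) := pvMinL_pull _ x (1 + y)
        _ = min x (1 + t.foldl min y) := by rw [pvMinL_shift]

-- the range shift: range(1, K+2) is 1 + range(0, K+1)
theorem pvRange_shift (K : Int) :
    PySem.List.pyRange 1 (K + 2) = (PySem.List.pyRange 0 (K + 1)).map (fun a => 1 + a) := by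
  rw [PySem.List.pyRange_one, PySem.List.pyRange_one, List.map_map]
  have h : (K + 2 - 1).toNat = (K + 1 - 0).toNat := by omega
  rw [h]
  apply List.map_congr_left
  intro a _
  simp only [Function.comp]
  omega

-- the polynomial search abstraction: pvBc c g s = min over k in 0..K of k + g(resid k c s)
def pvBc (c : Int) (g : List Int → Int) (s : List Int) : Int :=
  (PySem.List.min? ((PySem.List.pyRange 0
      (max 0 (pvMax (s.map (fun v => PySem.Int.floordiv v c))) + 1) 1).map
      (fun k => k + g (pvResid k c s))) (fun y => y)).getD 0

theorem pvBc_congr (c : Int) (g g' : List Int → Int) (s : List Int)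
    (h : ∀ t, t ≠ [] → g t = g' t) (hne : s ≠ []) : pvBc c g s = pvBc c g' s := by
  unfold pvBc
  congr 2
  apply List.map_congr_left
  intro k _
  have : pvResid k c s ≠ [] := by
    unfold pvResid; simpa using hne
  rw [h _ this]

-- the maximum of the floordivs drops by exactly one after one subtraction round
theorem pvKdrop (c : Int) (s : List Int) (hc : 0 < c) (hne : s ≠ [])
    (hex : ∃ v ∈ s, c ≤ v) :
    pvMax ((s.map (fun v => if c ≤ v then v - c else v)).map
        (fun v => PySem.Int.floordiv v c))
      = pvMax (s.map (fun v => PySem.Int.floordiv v c)) - 1 := by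
  obtain ⟨w, hw, hcw⟩ := hex
  set M := pvMax (s.map (fun v => PySem.Int.floordiv v c)) with hM
  have hM1 : 1 ≤ M := le_trans (pvFdiv_pos c w hc hcw)
    (le_pvMax _ _ (List.mem_map_of_mem hw))
  obtain ⟨u, hu, huM⟩ := List.mem_map.mp
    (pvMax_mem (s.map (fun v => PySem.Int.floordiv v c)) (by simpa using hne))
  have hcu : c ≤ u := by
    by_contra h
    have := pvFdiv_nonpos c u hc (by omega)
    omega
  apply pvMax_eq_of
  · rw [List.map_map]
    refine List.mem_map.mpr ⟨u, hu, ?_⟩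
    simp only [Function.comp, if_pos hcu]
    rw [pvFdiv_sub c u hc, huM]
  · intro x hx
    rw [List.map_map] at hx
    obtain ⟨v, hv, hvx⟩ := List.mem_map.mp hx
    simp only [Function.comp] at hvx
    by_cases hcv : c ≤ v
    · rw [if_pos hcv, pvFdiv_sub c v hc] at hvx
      have : PySem.Int.floordiv v c ≤ M := le_pvMax _ _ (List.mem_map_of_mem hv)
      omega
    · rw [if_neg hcv] at hvx
      have := pvFdiv_nonpos c v hc (by omega)
      omega

-- one step of the descent on the B side
theorem pvBc_step (c : Int) (g : List Int → Int) (s : List Int) (hc : 0 < c)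
    (hne : s ≠ []) (hex : ∃ v ∈ s, c ≤ v) :
    pvBc c g s
      = min (g s) (1 + pvBc c g (s.map (fun v => if c ≤ v then v - c else v))) := by
  set s1 := s.map (fun v => if c ≤ v then v - c else v) with hs1
  have hKdrop := pvKdrop c s hc hne hex
  set K1 := max 0 (pvMax (s1.map (fun v => PySem.Int.floordiv v c))) with hK1
  have hM1 : 1 ≤ pvMax (s.map (fun v => PySem.Int.floordiv v c)) := by
    obtain ⟨w, hw, hcw⟩ := hex
    exact le_trans (pvFdiv_pos c w hc hcw) (le_pvMax _ _ (List.mem_map_of_mem hw))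
  have hK : max 0 (pvMax (s.map (fun v => PySem.Int.floordiv v c))) = K1 + 1 := by
    rw [hK1, hKdrop]; omega
  unfold pvBc
  rw [hK]
  have hrange : PySem.List.pyRange 0 (K1 + 1 + 1) 1
      = 0 :: (PySem.List.pyRange 0 (K1 + 1) 1).map (fun a => 1 + a) := by
    rw [PySem.List.pyRange_one_cons (by omega : (0:Int) < K1 + 1 + 1)]
    rw [show (0:Int) + 1 = 1 from rfl, show K1 + 1 + 1 = K1 + 2 by ring, pvRange_shift]
  rw [hrange]
  simp only [List.map_cons, List.map_map]
  have hbody : ((PySem.List.pyRange 0 (K1 + 1) 1).map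
        ((fun k => k + g (pvResid k c s)) ∘ (fun a => 1 + a)))
      = ((PySem.List.pyRange 0 (K1 + 1) 1).map
        (fun k => k + g (pvResid k c s1))).map (fun a => 1 + a) := by
    rw [List.map_map]
    apply List.map_congr_left
    intro k hk
    have hk0 : 0 ≤ k := (PySem.List.mem_pyRange_one.mp hk).1
    simp only [Function.comp]
    rw [pvResid_shift c k s hc hk0]
    have : 1 + k = k + 1 := by ring
    rw [this]
    ring
  rw [hbody]
  have hne2 : ((PySem.List.pyRange 0 (K1 + 1) 1).map
      (fun k => k + g (pvResid k c s1))) ≠ [] := by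
    have : (0:Int) ∈ PySem.List.pyRange 0 (K1 + 1) 1 :=
      PySem.List.mem_pyRange_one.mpr ⟨le_rfl, by omega⟩
    intro h
    rw [List.map_eq_nil_iff] at h
    rw [h] at this
    exact List.not_mem_nil this
  cases hl : ((PySem.List.pyRange 0 (K1 + 1) 1).map (fun k => k + g (pvResid k c s1))) with
  | nil => exact absurd hl hne2
  | cons y t =>
      simp only [List.map_cons, PySem.List.min?_id_cons, Option.getD_some, List.foldl_cons]
      have h0 : (0:Int) + g (pvResid 0 c s) = g s := by rw [pvResid_zero]; ring
      rw [h0]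
      have := pvMinFold_shift (y :: t) (g s) (by simp)
      simp only [List.map_cons, List.foldl_cons, PySem.List.min?_id_cons,
        Option.getD_some] at this
      exact this

-- when no score reaches c, the search degenerates to k = 0
theorem pvBc_base (c : Int) (g : List Int → Int) (s : List Int) (hc : 0 < c)
    (hne : s ≠ []) (hex : ¬ ∃ v ∈ s, c ≤ v) : pvBc c g s = g s := by
  have hK : max 0 (pvMax (s.map (fun v => PySem.Int.floordiv v c))) = 0 := by
    have hmem := pvMax_mem (s.map (fun v => PySem.Int.floordiv v c)) (by simpa using hne)
    obtain ⟨v, hv, hvM⟩ := List.mem_map.mp hmem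
    have : ¬ c ≤ v := fun h => hex ⟨v, hv, h⟩
    have := pvFdiv_nonpos c v hc (by omega)
    omega
  unfold pvBc
  rw [hK, show (0:Int) + 1 = 0 + 1 from rfl, PySem.List.pyRange_one_singleton]
  simp only [List.map_cons, List.map_nil, PySem.List.min?_id_cons, Option.getD_some,
    List.foldl_nil]
  rw [pvResid_zero]; ring

-- A's recursion over the 1-point problems computes the maximum
theorem pvF_one : ∀ (N : Nat) (s : List Int), pvSumNat s ≤ N → s ≠ [] →
    pvF [1] s = pvMax s := by
  intro N
  induction N with
  | zero =>
      intro s hs hne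
      rw [pvF]
      by_cases hex : ∃ v ∈ s, (1:Int) ≤ v
      · obtain ⟨v, hv, h1⟩ := hex
        exfalso
        have : 1 ≤ pvSumNat s := by
          have : v.toNat ∈ s.map Int.toNat := List.mem_map_of_mem hv
          have h2 : 1 ≤ v.toNat := by omega
          have := List.single_le_sum (fun (x : Nat) _ => Nat.zero_le x) _ this
          unfold pvSumNat; omega
        omega
      · rw [if_neg (fun hh => hex hh.2)]
        simp only [min_self]
        rw [pvF]
        rfl
  | succ N ih =>
      intro s hs hne
      rw [pvF]
      by_cases hex : ∃ v ∈ s, (1:Int) ≤ v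
      · rw [if_pos ⟨le_rfl, hex⟩]
        set s1 := s.map (fun v => if (1:Int) ≤ v then v - 1 else v) with hs1
        have hdec := pvSumNat_dec 1 le_rfl s hex
        rw [← hs1] at hdec
        have hs1N : pvSumNat s1 ≤ N := by omega
        have hne1 : s1 ≠ [] := by rw [hs1]; simpa using hne
        rw [ih s1 hs1N hne1]
        have hmax1 : pvMax s1 = pvMax s - 1 := by
          obtain ⟨w, hw, hcw⟩ := hex
          have hM1 : 1 ≤ pvMax s := le_trans hcw (le_pvMax _ _ hw)
          apply pvMax_eq_of
          · refine List.mem_map.mpr ⟨pvMax s, pvMax_mem s hne, ?_⟩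
            rw [if_pos (by omega)]
          · intro x hx
            obtain ⟨v, hv, hvx⟩ := List.mem_map.mp hx
            have := le_pvMax s v hv
            by_cases h1 : (1:Int) ≤ v
            · rw [if_pos h1] at hvx; omega
            · rw [if_neg h1] at hvx; omega
        rw [hmax1]
        have hfnil : pvF [] s = pvMax s := by rw [pvF]; rfl
        rw [hfnil]
        omega
      · rw [if_neg (fun hh => hex hh.2)]
        simp only [min_self]
        rw [pvF]
        rfl

-- A's recursion over the c-point problems is B's search over how many are used
theorem pvF_cons (c : Int) (rest : List Int) (hc : 1 ≤ c) :
    ∀ (N : Nat) (s : List Int), pvSumNat s ≤ N → s ≠ [] →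
      pvF (c :: rest) s = pvBc c (pvF rest) s := by
  intro N
  induction N with
  | zero =>
      intro s hs hne
      rw [pvF]
      by_cases hex : ∃ v ∈ s, c ≤ v
      · obtain ⟨v, hv, h1⟩ := hex
        exfalso
        have : 1 ≤ pvSumNat s := by
          have : v.toNat ∈ s.map Int.toNat := List.mem_map_of_mem hv
          have h2 : 1 ≤ v.toNat := by omega
          have := List.single_le_sum (fun (x : Nat) _ => Nat.zero_le x) _ this
          unfold pvSumNat; omega
        omega
      · rw [if_neg (fun hh => hex hh.2)]
        simp only [min_self]
        rw [pvBc_base c _ s (by omega) hne hex]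
  | succ N ih =>
      intro s hs hne
      rw [pvF]
      by_cases hex : ∃ v ∈ s, c ≤ v
      · rw [if_pos ⟨hc, hex⟩]
        set s1 := s.map (fun v => if c ≤ v then v - c else v) with hs1
        have hdec := pvSumNat_dec c hc s hex
        rw [← hs1] at hdec
        have hne1 : s1 ≠ [] := by rw [hs1]; simpa using hne
        rw [ih s1 (by omega) hne1]
        rw [pvBc_step c _ s (by omega) hne hex]
      · rw [if_neg (fun hh => hex hh.2)]
        simp only [min_self]
        rw [pvBc_base c _ s (by omega) hne hex]

-- B's two layers are pvBc instances
theorem pvBest2_eq_pvBc (t : List Int) : pvBest2 t = pvBc 2 pvMax t := rfl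

theorem pvAlt_eq_pvBc (n : Int) (S : List Int) :
    getMinProblemCount1_alt n S = pvBc 3 pvBest2 S := rfl

theorem pvF21 (t : List Int) (hne : t ≠ []) : pvF [2, 1] t = pvBest2 t := by
  rw [pvF_cons 2 [1] (by omega) (pvSumNat t) t le_rfl hne, pvBest2_eq_pvBc]
  apply pvBc_congr
  · intro u hu
    exact pvF_one (pvSumNat u) u le_rfl hu
  · exact hne

-- ===== VERDICT (by name: the statement is the Claim_ definition above) =====
theorem getMinProblemCount1_spec : Claim_equal_getMinProblemCount1 := by
  intro n S _ hpre
  unfold Spec_getMinProblemCount1 getMinProblemCount1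
  rw [pvF_cons 3 [2, 1] (by omega) (pvSumNat S) S le_rfl hpre, pvAlt_eq_pvBc]
  exact pvBc_congr 3 _ _ S (fun t ht => pvF21 t ht) hpre
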